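-- pv_equiv track=rewrite | github.com/AYUSHSHARMA9817/SolSentry | build/lib/solsentry/detectors/reentrancy.py | detect_reentrancy
-- ===== SOURCE A (Python) =====
-- def detect_reentrancy(ops):
--
--     reads = set()
--     seen_external = False
--
--     for _, op, var in ops:
--
--         if op == "state_read" and not seen_external:
--             reads.add(var)
--
--         elif op == "external_call":
--             seen_external = True
--
--         elif op == "state_write" and seen_external:
--             if var in reads:
--                 return True
--
--     return False
-- ===== SOURCE B (Python) =====
-- def detect_reentrancy(ops):
--     idx = next((i for i, (_, op, _) in enumerate(ops) if op == "external_call"), None)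
--     if idx is None:
--         return False
--     reads = {var for _, op, var in ops[:idx] if op == "state_read"}
--     return any(op == "state_write" and var in reads
--                for _, op, var in ops[idx + 1:])
-- ===== Notes on version B (the rewrite author's own statement) =====
-- stated objective: alternative
-- what changed: Replaces the interleaved boolean state-machine loop with three separate phases: locate the first external_call index, build the reads set from the prefix by comprehension, then scan the suffix with any().
import Mathlib
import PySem

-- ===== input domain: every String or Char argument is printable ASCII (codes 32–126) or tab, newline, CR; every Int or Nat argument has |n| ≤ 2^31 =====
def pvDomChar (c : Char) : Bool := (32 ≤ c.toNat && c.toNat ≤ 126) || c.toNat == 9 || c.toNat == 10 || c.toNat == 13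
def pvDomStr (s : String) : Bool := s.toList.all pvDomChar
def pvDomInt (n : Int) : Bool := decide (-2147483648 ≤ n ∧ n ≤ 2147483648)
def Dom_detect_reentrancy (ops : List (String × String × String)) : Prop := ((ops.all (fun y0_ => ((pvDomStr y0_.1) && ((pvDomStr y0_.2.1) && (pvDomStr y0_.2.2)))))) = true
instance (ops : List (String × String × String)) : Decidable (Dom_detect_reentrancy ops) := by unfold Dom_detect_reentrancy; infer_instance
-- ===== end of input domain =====

-- B replaces A's interleaved state-machine loop by three phases (find first external_call, build reads from the prefix, scan the suffix); alternative decomposition, same value everywhere.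

-- ===== PORT A =====
-- the loop of A, with state (reads, seen_external); 'return True' is the 'true' leaf
def detectGo (reads : PySem.Set String) (seen : Bool) : List (String × String × String) → Bool
  | [] => false
  | (_, op, var) :: rest =>
    if op == "state_read" && !seen then detectGo (PySem.Set.add reads var) seen rest
    else if op == "external_call" then detectGo reads true rest
    else if op == "state_write" && seen then
      if PySem.Set.contains reads var then true else detectGo reads seen rest
    else detectGo reads seen rest

def detect_reentrancy (ops : List (String × String × String)) : Bool :=
  detectGo PySem.Set.empty false ops

-- ===== PORT B =====
def detect_reentrancy_alt (ops : List (String × String × String)) : Bool :=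
  match ops.findIdx? (fun t => t.2.1 == "external_call") with
  | none => false
  | some i =>
    let reads : PySem.Set String :=
      PySem.Set.ofList (((ops.take i).filter (fun t => t.2.1 == "state_read")).map (fun t => t.2.2))
    (ops.drop (i + 1)).any (fun t => t.2.1 == "state_write" && PySem.Set.contains reads t.2.2)

-- ===== PRECONDITION & SPEC =====
def Spec_detect_reentrancy (ops : List (String × String × String)) (out : Bool) : Prop := out = detect_reentrancy_alt ops
instance (ops : List (String × String × String)) (out : Bool) : Decidable (Spec_detect_reentrancy ops out) := by unfold Spec_detect_reentrancy; infer_instance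

-- ===== CLAIM (what is proved, stated in full; the proofs are below) =====
def Claim_equal_detect_reentrancy : Prop := ∀ (ops : List (String × String × String)), Dom_detect_reentrancy ops → Spec_detect_reentrancy ops (detect_reentrancy ops)

-- ===== LEMMAS AND PROOFS =====

-- once seen_external is true, A's loop is exactly an 'any' over the remaining ops
theorem detectGo_true (ops : List (String × String × String)) (reads : PySem.Set String) :
    detectGo reads true ops
      = ops.any (fun t => t.2.1 == "state_write" && PySem.Set.contains reads t.2.2) := by
  induction ops with
  | nil => rfl
  | cons t rest ih =>
    obtain ⟨a, op, v⟩ := t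
    simp only [detectGo, Bool.not_true, Bool.and_false, List.any_cons]
    by_cases hext : op = "external_call"
    · subst hext; simp [ih]
    · by_cases hw : op = "state_write"
      · subst hw
        by_cases hm : v ∈ reads <;> simp [hm, ih, PySem.Set.contains]
      · simp [hext, hw, ih]

-- B's result as a function of the reads accumulated so far (Set.update reads l = l.foldl add reads)
def altFrom (reads : PySem.Set String) (ops : List (String × String × String)) : Bool :=
  match ops.findIdx? (fun t => t.2.1 == "external_call") with
  | none => false
  | some i =>
    (ops.drop (i + 1)).any (fun t => t.2.1 == "state_write" &&
      PySem.Set.contains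
        (PySem.Set.update reads (((ops.take i).filter (fun t => t.2.1 == "state_read")).map (fun t => t.2.2)))
        t.2.2)

theorem detectGo_false (ops : List (String × String × String)) (reads : PySem.Set String) :
    detectGo reads false ops = altFrom reads ops := by
  induction ops generalizing reads with
  | nil => rfl
  | cons t rest ih =>
    obtain ⟨a, op, v⟩ := t
    by_cases hext : op = "external_call"
    · subst hext
      simp [detectGo, altFrom, List.findIdx?_cons, detectGo_true, PySem.Set.update]
    · rcases hfi : rest.findIdx? (fun t => t.2.1 == "external_call") with _ | i <;>
        by_cases hr : op = "state_read" <;>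
        first
          | (subst hr; simp [detectGo, altFrom, List.findIdx?_cons, hfi, ih,
              PySem.Set.update])
          | simp [detectGo, altFrom, List.findIdx?_cons, hext, hr, hfi, ih, PySem.Set.update]

theorem detect_reentrancy_spec' (ops : List (String × String × String)) :
    detect_reentrancy ops = detect_reentrancy_alt ops := by
  simp [detect_reentrancy, detect_reentrancy_alt, detectGo_false, altFrom,
    PySem.Set.update, PySem.Set.ofList_eq_foldl, PySem.Set.empty]

-- ===== VERDICT (by name: the statement is the Claim_ definition above) =====
theorem detect_reentrancy_spec : Claim_equal_detect_reentrancy := by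
  intro ops _
  exact detect_reentrancy_spec' ops
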